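-- pv_equiv track=rewrite | github.com/schickeneder/helium_processor | mutual_measurements.py | count_mutual_locations
-- ===== SOURCE A (Python) =====
-- def count_mutual_locations(distances):
--     mutual_locs = {}
--     for row in distances:
--         if str(row[0]) < str(row[1]):
--             new_key = row[0] + '_' + row[1]
--         else:
--             new_key = row[1] + '_' + row[0]
--         if new_key not in mutual_locs:
--             mutual_locs[new_key] = 1
--         else:
--             mutual_locs[new_key] += 1
--
--     return mutual_locs
-- ===== SOURCE B (Python) =====
-- def count_mutual_locations(distances):
--     keys = []
--     for row in distances:
--         a, b = row[0], row[1]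
--         keys.append(a + '_' + b if str(a) < str(b) else b + '_' + a)
--     result = {}
--     ks = keys
--     while ks:
--         k = ks[0]
--         result[k] = sum(1 for x in ks if x == k)
--         ks = [x for x in ks if x != k]
--     return result
-- ===== Notes on version B (the rewrite author's own statement) =====
-- stated objective: alternative
-- what changed: Replaces hash-table counting with successive partitioning: after materializing the normalized-key list, repeatedly take the first remaining key, count it by filtering, and drop all its occurrences until the list is empty; no per-element dict lookup/update loop remains.
import Mathlib
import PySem

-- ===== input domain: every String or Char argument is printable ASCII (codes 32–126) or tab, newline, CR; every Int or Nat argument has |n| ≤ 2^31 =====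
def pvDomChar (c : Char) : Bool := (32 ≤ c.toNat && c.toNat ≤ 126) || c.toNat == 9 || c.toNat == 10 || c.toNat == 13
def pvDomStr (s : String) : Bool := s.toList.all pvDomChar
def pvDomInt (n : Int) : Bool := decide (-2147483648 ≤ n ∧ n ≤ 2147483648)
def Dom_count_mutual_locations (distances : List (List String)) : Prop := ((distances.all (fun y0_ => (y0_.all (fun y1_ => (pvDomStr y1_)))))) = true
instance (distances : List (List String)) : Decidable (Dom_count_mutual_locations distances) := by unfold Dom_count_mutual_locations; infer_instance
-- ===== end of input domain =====

-- B counts by successive partitioning of the normalized-key list (take first key,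
-- count it by filtering, drop its occurrences) instead of hash counting; not claimed faster.

-- ===== PORT A =====
-- rows with < 2 elements make Python raise IndexError; those inputs are excluded by Pre_
def count_mutual_locations (distances : List (List String)) : List (String × Int) :=
  (distances.foldl (fun mutual_locs row =>
    match row with
    | a :: b :: _ =>
      let new_key := if a < b then a ++ "_" ++ b else b ++ "_" ++ a
      if mutual_locs.contains new_key = false then mutual_locs.insert new_key 1
      else mutual_locs.insert new_key (mutual_locs.getD new_key 0 + 1)
    | _ => mutual_locs) (PySem.Dict.empty (κ := String) (ν := Int))).items

-- ===== PORT B =====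
-- the while-loop of Source B: take the first remaining key, count it, drop all its occurrences
def pvPartitionCount : List String → List (String × Int)
  | [] => []
  | k :: t =>
    (k, (((k :: t).filter (fun x => x == k)).length : Int))
      :: pvPartitionCount (t.filter (fun x => x != k))
termination_by l => l.length
decreasing_by
  simpa using Nat.lt_succ_of_le (List.length_filter_le _ _)

def count_mutual_locations_alt (distances : List (List String)) : List (String × Int) :=
  let keys := distances.foldl (fun ks row =>
    match row with
    | [] => ks
    | [_] => ks
    | a :: b :: _ => ks ++ [if a < b then a ++ "_" ++ b else b ++ "_" ++ a]) []
  pvPartitionCount keys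

-- ===== PRECONDITION & SPEC =====
-- A raises IndexError on any row with fewer than two elements; Pre_ excludes exactly those inputs.
def Pre_count_mutual_locations (distances : List (List String)) : Prop :=
  ∀ row ∈ distances, 2 ≤ row.length
instance (distances : List (List String)) : Decidable (Pre_count_mutual_locations distances) := by unfold Pre_count_mutual_locations; infer_instance
def pvWitness_count_mutual_locations : List (List String) := [["b", "a"], ["a", "b"], ["a", "c"]]

def Spec_count_mutual_locations (distances : List (List String)) (out : List (String × Int)) : Prop := out = count_mutual_locations_alt distances
instance (distances : List (List String)) (out : List (String × Int)) : Decidable (Spec_count_mutual_locations distances out) := by unfold Spec_count_mutual_locations; infer_instance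

-- ===== CLAIM (what is proved, stated in full; the proofs are below) =====
def Claim_equal_count_mutual_locations : Prop := ∀ (distances : List (List String)), Dom_count_mutual_locations distances → Pre_count_mutual_locations distances → Spec_count_mutual_locations distances (count_mutual_locations distances)

-- ===== LEMMAS AND PROOFS =====

-- the normalized key of one (long-enough) row
def pvKeyOf (row : List String) : List String :=
  match row with
  | a :: b :: _ => [if a < b then a ++ "_" ++ b else b ++ "_" ++ a]
  | _ => []

-- B's key-collecting loop is flatMap of pvKeyOf
lemma pvKeysFold (ds : List (List String)) (ks : List String) :
    ds.foldl (fun ks row =>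
      match row with
      | [] => ks
      | [_] => ks
      | a :: b :: _ => ks ++ [if a < b then a ++ "_" ++ b else b ++ "_" ++ a]) ks
      = ks ++ ds.flatMap pvKeyOf := by
  induction ds generalizing ks with
  | nil => simp
  | cons r t ih =>
    cases r with
    | nil => simpa [pvKeyOf] using ih ks
    | cons a r' =>
      cases r' with
      | nil => simpa [pvKeyOf] using ih ks
      | cons b r'' =>
        simp only [List.foldl_cons]
        rw [ih]
        simp [pvKeyOf]

-- A's dict loop is the counter loop over the flattened keys
lemma pvAFold (ds : List (List String)) (h : ∀ row ∈ ds, 2 ≤ row.length)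
    (d : PySem.Dict String Int) :
    ds.foldl (fun mutual_locs row =>
      match row with
      | a :: b :: _ =>
        let new_key := if a < b then a ++ "_" ++ b else b ++ "_" ++ a
        if mutual_locs.contains new_key = false then mutual_locs.insert new_key 1
        else mutual_locs.insert new_key (mutual_locs.getD new_key 0 + 1)
      | _ => mutual_locs) d
    = (ds.flatMap pvKeyOf).foldl (fun d k => d.insert k (d.getD k 0 + 1)) d := by
  induction ds generalizing d with
  | nil => simp
  | cons r t ih =>
    have hr := h r (List.mem_cons_self)
    match r, hr with
    | a :: b :: r'', _ =>
      have ht : ∀ row ∈ t, 2 ≤ row.length := fun row hm => h row (List.mem_cons_of_mem _ hm)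
      simp only [List.foldl_cons, List.flatMap_cons, pvKeyOf, List.singleton_append,
        List.foldl_cons]
      rw [ih ht]
      congr 1
      set k := if a < b then a ++ "_" ++ b else b ++ "_" ++ a with hk
      by_cases hc : d.contains k = false
      · rw [if_pos hc, PySem.Dict.getD_of_not_contains d 0 hc]; norm_num
      · rw [if_neg hc]

-- discarding the element just added
lemma pvDiscardAddSelf (s : PySem.Set String) (x : String) :
    PySem.Set.discard (PySem.Set.add s x) x = PySem.Set.discard s x := by
  simp only [PySem.Set.add, PySem.Set.discard]
  split <;> simp

-- add and discard commute for distinct elements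
lemma pvDiscardAddComm (s : PySem.Set String) (x k : String) (h : x ≠ k) :
    PySem.Set.discard (PySem.Set.add s x) k = PySem.Set.add (PySem.Set.discard s k) x := by
  simp only [PySem.Set.add, PySem.Set.discard]
  by_cases hx : x ∈ s
  · have hm : x ∈ List.filter (fun y => !y == k) s := by simp [hx, h]
    simp [hx, hm]
  · have hm : x ∉ List.filter (fun y => !y == k) s := by simp [hx]
    simp [hx, hm, List.filter_append, h]

-- removing all occurrences of the head commutes with ordered dedup
lemma pvOfListFilterNe (k : String) (t : List String) :
    PySem.Set.ofList (t.filter (fun x => x != k))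
      = PySem.Set.discard (PySem.Set.ofList t) k := by
  induction t using List.reverseRecOn with
  | nil => simp [PySem.Set.ofList, PySem.Set.empty, PySem.Set.discard]
  | append_singleton t y ih =>
    rw [List.filter_append, PySem.Set.ofList_append_singleton]
    by_cases hy : y = k
    · subst hy
      simp only [List.filter_cons, List.filter_nil, bne_self_eq_false, Bool.false_eq_true,
        if_false, List.append_nil]
      rw [ih, pvDiscardAddSelf]
    · have hb : (y != k) = true := by simp [hy]
      simp only [List.filter_cons, List.filter_nil, hb, if_true]
      rw [PySem.Set.ofList_append_singleton, ih, pvDiscardAddComm _ _ _ hy]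

-- one partition round counts the head key
lemma pvCount (k : String) (t : List String) :
    ((k :: t).filter (fun x => x == k)).length = (k :: t).count k := by
  simp [List.count, List.countP_eq_length_filter]

-- the partition loop computes Counter(ks).items
lemma pvPartitionCount_eq (ks : List String) :
    pvPartitionCount ks
      = (PySem.Set.ofList ks).map (fun k => (k, (ks.count k : Int))) := by
  generalize hn : ks.length = n
  induction n using Nat.strong_induction_on generalizing ks with
  | _ n ih =>
    match ks with
    | [] => simp [pvPartitionCount, PySem.Set.ofList, PySem.Set.empty]
    | k :: t =>
      have hlt : (t.filter (fun x => x != k)).length < n := by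
        subst hn
        exact Nat.lt_succ_of_le (List.length_filter_le _ _)
      have ih' := ih _ hlt (t.filter (fun x => x != k)) rfl
      rw [pvPartitionCount, PySem.Set.ofList_cons, List.map_cons]
      refine congrArg₂ _ ?_ ?_
      · rw [pvCount]
      · rw [ih', pvOfListFilterNe]
        refine List.map_congr_left ?_
        intro y hy
        have hmem := (PySem.Set.mem_discard _ _ _).mp hy
        have hne : y ≠ k := hmem.2
        have h1 : (t.filter (fun x => x != k)).count y = t.count y :=
          List.count_filter (by simp [hne])
        simp [h1, Ne.symm hne]

-- ===== VERDICT (by name: the statement is the Claim_ definition above) =====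
theorem count_mutual_locations_spec : Claim_equal_count_mutual_locations := by
  intro ds _ hpre
  unfold Spec_count_mutual_locations count_mutual_locations count_mutual_locations_alt
  rw [pvAFold ds hpre, pvKeysFold, PySem.Dict.foldl_insert_getD_add_one_eq_counter,
    PySem.Dict.items_counter, List.nil_append, pvPartitionCount_eq]
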